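-- pv_equiv track=rewrite | github.com/Vignesh-valarmadhy/Blobby_Valley | Blobbey_Valley.py | find_scores
-- ===== SOURCE A (Python) =====
-- def find_scores(game_results):
--     alice_score = 0
--     bob_score = 0
--     is_alice_serving = True
--
--     for result in game_results:
--         if is_alice_serving:
--             if result == 'A':
--                 alice_score += 1
--             else:
--                 is_alice_serving = False  # Switch roles
--         else:
--             is_alice_serving = True  # Switch roles
--
--     return alice_score, bob_score
-- ===== SOURCE B (Python) =====
-- def find_scores(game_results):
--     # Right-to-left suffix dynamic programming: a = score of the suffix starting
--     # here (serve in hand), b = score of the suffix one element later.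
--     a, b = 0, 0
--     for r in reversed(list(game_results)):
--         a, b = (a + 1 if r == 'A' else b), a
--     return (a, 0)
-- ===== Notes on version B (the rewrite author's own statement) =====
-- stated objective: alternative
-- what changed: Replaces the left-to-right serving-flag state machine with a right-to-left two-register dynamic program over suffixes (score(suffix i) = score(i+1)+1 if 'A' else score(i+2)); no serving state is carried.
import Mathlib
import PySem

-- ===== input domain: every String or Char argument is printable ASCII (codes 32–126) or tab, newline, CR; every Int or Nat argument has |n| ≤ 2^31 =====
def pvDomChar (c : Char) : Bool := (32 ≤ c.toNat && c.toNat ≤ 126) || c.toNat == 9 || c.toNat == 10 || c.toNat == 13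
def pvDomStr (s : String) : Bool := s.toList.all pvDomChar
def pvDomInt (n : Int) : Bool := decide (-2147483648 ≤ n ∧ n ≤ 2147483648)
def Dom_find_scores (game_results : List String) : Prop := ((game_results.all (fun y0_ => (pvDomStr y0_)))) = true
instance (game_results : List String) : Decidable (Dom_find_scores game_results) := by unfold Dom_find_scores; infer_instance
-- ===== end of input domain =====

-- B replaces A's left-to-right serving-flag state machine with a right-to-left
-- two-register suffix dynamic program (alternative decomposition; same O(n) cost).

-- ===== PORT A =====
-- A's for loop over state (alice_score, bob_score, is_alice_serving)
def findScoresStep (st : Int × Int × Bool) (result : String) : Int × Int × Bool :=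
  if st.2.2 then
    if result = "A" then (st.1 + 1, st.2.1, st.2.2) else (st.1, st.2.1, false)
  else (st.1, st.2.1, true)

def find_scores (game_results : List String) : Int × Int :=
  let r := game_results.foldl findScoresStep (0, 0, true)
  (r.1, r.2.1)

-- ===== PORT B =====
-- B's loop over reversed(results) carrying the two suffix scores (a, b)
def find_scores_alt (game_results : List String) : Int × Int :=
  let p := game_results.reverse.foldl
    (fun (p : Int × Int) r => (if r = "A" then p.1 + 1 else p.2, p.1)) (0, 0)
  (p.1, 0)

-- ===== PRECONDITION & SPEC =====
def Spec_find_scores (game_results : List String) (out : Int × Int) : Prop := out = find_scores_alt game_results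
instance (game_results : List String) (out : Int × Int) : Decidable (Spec_find_scores game_results out) := by unfold Spec_find_scores; infer_instance

-- ===== CLAIM (what is proved, stated in full; the proofs are below) =====
def Claim_equal_find_scores : Prop := ∀ (game_results : List String), Dom_find_scores game_results → Spec_find_scores game_results (find_scores game_results)

-- ===== LEMMAS AND PROOFS =====

-- the common specification: score of a list with the serve in hand at its head
def scoreS : List String → Int
  | [] => 0
  | x :: t => if x = "A" then 1 + scoreS t else scoreS t.tail
termination_by l => l.length
decreasing_by all_goals simp [List.length_tail]; try omega

-- A's fold computes scoreS (bob component untouched, serving flag true)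
theorem foldA_eq_scoreS (l : List String) (s b : Int) :
    (l.foldl findScoresStep (s, b, true)).1 = s + scoreS l := by
  cases l with
  | nil => simp [scoreS]
  | cons x t =>
    rw [List.foldl_cons]
    by_cases hA : x = "A"
    · have h1 : findScoresStep (s, b, true) x = (s + 1, b, true) := by
        simp [findScoresStep, hA]
      rw [h1, foldA_eq_scoreS t (s + 1) b]
      simp [scoreS, hA]; ring
    · have h1 : findScoresStep (s, b, true) x = (s, b, false) := by
        simp [findScoresStep, hA]
      rw [h1]
      cases t with
      | nil => simp [scoreS, hA]
      | cons y u =>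
        rw [List.foldl_cons]
        have h2 : findScoresStep (s, b, false) y = (s, b, true) := by
          simp [findScoresStep]
        rw [h2, foldA_eq_scoreS u s b]
        simp [scoreS, hA]
termination_by l.length
decreasing_by all_goals simp; try omega

-- B's reversed fold carries (scoreS l, scoreS l.tail)
theorem foldB_pair (l : List String) :
    l.reverse.foldl (fun (p : Int × Int) r => (if r = "A" then p.1 + 1 else p.2, p.1)) (0, 0)
      = (scoreS l, scoreS l.tail) := by
  induction l with
  | nil => simp [scoreS]
  | cons x t ih =>
      simp only [List.reverse_cons, List.foldl_append, ih, List.foldl_cons, List.foldl_nil,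
        List.tail_cons, scoreS]
      by_cases hA : x = "A"
      · simp [hA]; ring
      · simp [hA]

-- ===== VERDICT (by name: the statement is the Claim_ definition above) =====
theorem find_scores_spec : Claim_equal_find_scores := by
  intro l _
  show find_scores l = find_scores_alt l
  have hb : ∀ (m : List String) (st : Int × Int × Bool),
      (m.foldl findScoresStep st).2.1 = st.2.1 := by
    intro m
    induction m with
    | nil => intro st; rfl
    | cons x t ih =>
        intro st
        simp only [List.foldl_cons, ih]
        simp [findScoresStep]; split_ifs <;> rfl
  simp only [find_scores, find_scores_alt, foldB_pair, foldA_eq_scoreS l 0 0,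
    hb l (0, 0, true)]
  simp
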